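-- pv_equiv track=rewrite | github.com/tjfulle/Modulecmd.py | lib/pymod/pymod/gendocs.py | fill_with_paragraphs
-- ===== SOURCE A (Python) =====
-- import textwrap
--
-- def fill_with_paragraphs(string, indent=''):
--     filled = []
--     lines = []
--     for line in string.split('\n'):
--         if line.split():
--             lines.append(line)
--         elif lines:
--             filled.append(
--                 textwrap.fill('\n'.join(lines),
--                               width=80,
--                               initial_indent=indent,
--                               subsequent_indent=indent)
--                 + '\n'
--             )
--             lines = []
--     if lines:
--         filled.append(
--             textwrap.fill('\n'.join(lines),
--                           width=80,
--                           initial_indent=indent,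
--                           subsequent_indent=indent)
--             + '\n'
--         )
--     return '\n'.join(filled)
-- ===== SOURCE B (Python) =====
-- import itertools
-- import textwrap
--
--
-- def fill_with_paragraphs(string, indent=''):
--     # Group the lines by blank/non-blank with itertools.groupby and keep the
--     # runs of non-blank lines; wrap each run in one shot.  No manual
--     # accumulator and no separate post-loop flush.
--     return '\n'.join(
--         textwrap.fill('\n'.join(group),
--                       width=80,
--                       initial_indent=indent,
--                       subsequent_indent=indent)
--         + '\n'
--         for key, group in itertools.groupby(string.split('\n'),
--                                             key=lambda line: bool(line.split()))
--         if key
--     )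
-- ===== Notes on version B (the rewrite author's own statement) =====
-- stated objective: idiomatic
-- what changed: B replaces A's streaming accumulate-and-flush loop (with its duplicated post-loop flush) by itertools.groupby keyed on blank/non-blank, keeping the non-blank runs and mapping textwrap.fill over them.
import Mathlib
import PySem

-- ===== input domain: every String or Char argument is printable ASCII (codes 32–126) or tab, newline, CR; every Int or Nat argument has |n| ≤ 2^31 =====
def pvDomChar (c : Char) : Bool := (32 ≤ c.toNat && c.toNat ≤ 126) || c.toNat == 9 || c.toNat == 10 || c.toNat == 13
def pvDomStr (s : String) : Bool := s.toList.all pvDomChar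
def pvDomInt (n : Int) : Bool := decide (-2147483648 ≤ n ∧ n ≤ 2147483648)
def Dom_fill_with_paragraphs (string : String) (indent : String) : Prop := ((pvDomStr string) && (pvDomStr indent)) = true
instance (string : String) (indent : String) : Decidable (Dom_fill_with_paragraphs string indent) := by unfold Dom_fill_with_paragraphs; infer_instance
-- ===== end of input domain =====

-- B groups the input's lines with itertools.groupby keyed on blank/non-blank and wraps each
-- non-blank run in one shot, instead of A's accumulate-and-flush loop (objective: idiomatic).
-- Both programs call textwrap.fill(width=80, initial_indent=indent, subsequent_indent=indent);
-- each port carries its own transliteration of that library call (exact on the ASCII domain Dom_):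
-- A's is index-based (twSplit/twWordScan/twWrapLoop), B's processes the character lists
-- structurally (bTokens/bWordEnd zipper, one fuel-bounded wrap loop bWrap).

-- ===== PORT A =====
-- A-side port of textwrap.fill(text, width=80, initial_indent=ind, subsequent_indent=ind)
-- character classes of textwrap's wordsep_re, on the ASCII domain (Dom)
def twIsWS (c : Char) : Bool := c = '\t' || c = '\n' || c.toNat == 11 || c.toNat == 12 || c = '\r' || c = ' '
def twIsWord (c : Char) : Bool := PySem.Chars.isalnum c || c = '_'        -- \w
def twIsLetter (c : Char) : Bool := PySem.Chars.isalpha c || c = '_'      -- [^\d\W]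
def twIsPunct (c : Char) : Bool :=                                        -- [\w!"'&.,?]
  twIsWord c || c = '!' || c = '"' || c = '\'' || c = '&' || c = '.' || c = ',' || c = '?'

-- str.expandtabs(8) (column resets at '\n'/'\r', as in CPython)
def twExpandTabs (col : Nat) : List Char → List Char
  | [] => []
  | c :: cs =>
    if c = '\t' then List.replicate (8 - col % 8) ' ' ++ twExpandTabs (col + (8 - col % 8)) cs
    else if c = '\n' ∨ c = '\r' then c :: twExpandTabs 0 cs
    else c :: twExpandTabs (col + 1) cs

-- TextWrapper._munge_whitespace: expandtabs then translate '\t\n\x0b\x0c\r ' ↦ ' '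
def twMunge (cs : List Char) : List Char :=
  (twExpandTabs 0 cs).map (fun c => if twIsWS c then ' ' else c)

def twTest (cs : List Char) (j : Nat) (p : Char → Bool) : Bool :=
  match cs[j]? with
  | some c => p c
  | none => false

-- length of the maximal run of '-' starting at k
def twHyphenRun (cs : List Char) (k : Nat) : Nat := ((cs.drop k).takeWhile (· = '-')).length

-- the word alternative of wordsep_re: lazy nws+? followed by (hyphen-break | end-of-word | em-dash-ahead)
def twWordScan (cs : List Char) (j : Nat) : Nat :=
  if hj : j < cs.length then
    -- hyphenated-word branch: consume '-' with lookbehind (lt lt - | lt - lt -) and lookahead (lt -? lt)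
    if cs[j] = '-' ∧
        ((2 ≤ j ∧ twTest cs (j-2) twIsLetter ∧ twTest cs (j-1) twIsLetter) ∨
         (3 ≤ j ∧ twTest cs (j-3) twIsLetter ∧ twTest cs (j-2) (· = '-') ∧ twTest cs (j-1) twIsLetter)) ∧
        (twTest cs (j+1) twIsLetter ∧
          (twTest cs (j+2) twIsLetter ∨ (twTest cs (j+2) (· = '-') ∧ twTest cs (j+3) twIsLetter)))
    then j + 1
    -- end-of-word branch: lookahead whitespace (end-of-string is the j ≥ length case)
    else if twIsWS cs[j] then j
    -- em-dash-ahead branch: lookbehind word-punct, lookahead -{2,}\w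
    else if twTest cs (j-1) twIsPunct ∧ 2 ≤ twHyphenRun cs j ∧ twTest cs (j + twHyphenRun cs j) twIsWord then j
    else twWordScan cs (j+1)
  else j
termination_by cs.length - j

theorem twWordScan_ge (cs : List Char) (j : Nat) : j ≤ twWordScan cs j := by
  fun_induction twWordScan cs j <;> omega

-- TextWrapper._split via wordsep_re (break_on_hyphens=True): leftmost match at every position,
-- alternatives tried in the regex's order (whitespace run | em-dash | word)
def twSplit (cs : List Char) (i : Nat) : List (List Char) :=
  if h : i < cs.length then
    if twIsWS cs[i] then
      let r := ((cs.drop i).takeWhile twIsWS).length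
      (cs.drop i).take r :: twSplit cs (i + r)
    else if cs[i] = '-' ∧ 1 ≤ i ∧ twTest cs (i-1) twIsPunct ∧ 2 ≤ twHyphenRun cs i ∧
            twTest cs (i + twHyphenRun cs i) twIsWord then
      let r := twHyphenRun cs i
      (cs.drop i).take r :: twSplit cs (i + r)
    else
      let j := twWordScan cs (i+1)
      (cs.drop i).take (j - i) :: twSplit cs j
  else []
termination_by cs.length - i
decreasing_by
  · have hd : cs.drop i = cs[i] :: cs.drop (i+1) := List.drop_eq_getElem_cons h
    rw [hd, List.takeWhile_cons]
    simp_all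
    omega
  · omega
  · have := twWordScan_ge cs (i+1)
    omega

-- the inner while of _wrap_chunks: pop chunks that still fit; returns (popped, cur_len, rest)
def twTake (width : Nat) (clen : Nat) : List (List Char) → List (List Char) × Nat × List (List Char)
  | [] => ([], clen, [])
  | c :: rest =>
    if clen + c.length ≤ width then
      (c :: (twTake width (clen + c.length) rest).1, (twTake width (clen + c.length) rest).2)
    else ([], clen, c :: rest)

-- TextWrapper._handle_long_word (break_long_words=True, break_on_hyphens=True):
-- returns (piece put on the current line, remainder of the chunk)
def twHandleLong (width clen : Nat) (c : List Char) : List Char × List Char :=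
  let spaceLeft := if width < 1 then 1 else width - clen
  let e :=
    if spaceLeft < c.length then
      let hy := PySem.Chars.rfind (c.take spaceLeft) ['-']
      if 0 < hy ∧ (c.take hy.toNat).any (fun x => x ≠ '-') then hy.toNat + 1 else spaceLeft
    else spaceLeft
  (c.take e, c.drop e)

def twMeasure (chunks : List (List Char)) : Nat := (chunks.map (fun c => c.length + 1)).sum

-- filling one line: the inner while plus the long-word fix-up of _wrap_chunks
def twLine (width : Nat) (chunks1 : List (List Char)) : List (List Char) × List (List Char) :=
  match (twTake width 0 chunks1).2.2 with
  | d :: rem' =>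
    if width < d.length then
      ((twTake width 0 chunks1).1 ++ [(twHandleLong width (twTake width 0 chunks1).2.1 d).1],
       (twHandleLong width (twTake width 0 chunks1).2.1 d).2 :: rem')
    else ((twTake width 0 chunks1).1, d :: rem')
  | [] => ((twTake width 0 chunks1).1, [])

-- one iteration of _wrap_chunks' outer while (max_lines=None, drop_whitespace=True):
-- returns (the finished line's chunks if one is emitted, the remaining chunks)
-- the leading-whitespace drop at the top of each outer iteration
def twDropLead (hasLines : Bool) (chunks : List (List Char)) : List (List Char) :=
  if hasLines && (match chunks with | c :: _ => PySem.Chars.strip c == [] | [] => false)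
  then chunks.tail else chunks
-- "if the last chunk on this line is all whitespace, drop it"
def twDropTrailWS (line0 : List (List Char)) : List (List Char) :=
  match line0.getLast? with
  | some l => if PySem.Chars.strip l = [] then line0.dropLast else line0
  | none => line0
def twStep (width : Nat) (hasLines : Bool) (chunks : List (List Char)) :
    Option (List (List Char)) × List (List Char) :=
  ((if twDropTrailWS (twLine width (twDropLead hasLines chunks)).1 = [] then none
    else some (twDropTrailWS (twLine width (twDropLead hasLines chunks)).1)),
   (twLine width (twDropLead hasLines chunks)).2)

theorem twTake_append (width clen : Nat) (chunks : List (List Char)) :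
    (twTake width clen chunks).1 ++ (twTake width clen chunks).2.2 = chunks := by
  induction chunks generalizing clen with
  | nil => simp [twTake]
  | cons c rest ih =>
    by_cases hcond : clen + c.length ≤ width
    · simp [twTake, hcond, ih]
    · simp [twTake, hcond]

theorem twTake_nil (width clen : Nat) (chunks : List (List Char))
    (h : (twTake width clen chunks).1 = []) :
    (twTake width clen chunks).2.2 = chunks ∧ (twTake width clen chunks).2.1 = clen := by
  cases chunks with
  | nil => simp [twTake]
  | cons c rest =>
    by_cases hcond : clen + c.length ≤ width
    · simp [twTake, hcond] at h
    · simp [twTake, hcond]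

theorem twTake_nil_cond (width clen : Nat) (c : List Char) (rest : List (List Char))
    (h : (twTake width clen (c :: rest)).1 = []) : width < clen + c.length := by
  by_cases hcond : clen + c.length ≤ width
  · simp [twTake, hcond] at h
  · omega

theorem twMeasure_append (a b : List (List Char)) :
    twMeasure (a ++ b) = twMeasure a + twMeasure b := by
  simp [twMeasure]

theorem twHandleLong_lt (width : Nat) (c : List Char) (hc : width < c.length) :
    (twHandleLong width 0 c).2.length < c.length := by
  unfold twHandleLong
  simp only [List.length_drop]
  have hlen : 1 ≤ c.length := by omega
  set sl := if width < 1 then 1 else width - 0 with hsl_def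
  have hsl : 1 ≤ sl := by rw [hsl_def]; split <;> omega
  split
  · split
    · omega
    · omega
  · omega

theorem twHandleLong_le (width clen : Nat) (c : List Char) :
    (twHandleLong width clen c).2.length ≤ c.length := by
  unfold twHandleLong
  simp

theorem twLine_le (width : Nat) (chunks1 : List (List Char)) :
    twMeasure (twLine width chunks1).2 ≤ twMeasure chunks1 := by
  unfold twLine
  have happ := twTake_append width 0 chunks1
  have hle : twMeasure (twTake width 0 chunks1).2.2 ≤ twMeasure chunks1 := by
    conv_rhs => rw [← happ]
    rw [twMeasure_append]; omega
  split
  · next d rem' heq =>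
    rw [heq] at hle
    split
    · have := twHandleLong_le width (twTake width 0 chunks1).2.1 d
      simp only [twMeasure, List.map_cons, List.sum_cons] at *
      omega
    · exact hle
  · simp [twMeasure]

theorem twLine_lt (width : Nat) (chunks1 : List (List Char)) (hne : chunks1 ≠ []) :
    twMeasure (twLine width chunks1).2 < twMeasure chunks1 := by
  obtain ⟨c, rest, rfl⟩ : ∃ c rest, chunks1 = c :: rest := by
    cases chunks1 with
    | nil => exact absurd rfl hne
    | cons c rest => exact ⟨c, rest, rfl⟩
  unfold twLine
  have happ := twTake_append width 0 (c :: rest)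
  by_cases hp : (twTake width 0 (c :: rest)).1 = []
  · obtain ⟨hrem, hlen⟩ := twTake_nil width 0 (c :: rest) hp
    have hbig : width < c.length := by
      have := twTake_nil_cond width 0 c rest hp
      omega
    rw [hrem, hlen]
    simp only [hbig, if_true]
    have := twHandleLong_lt width c hbig
    simp only [twMeasure, List.map_cons, List.sum_cons]
    omega
  · have hlt : twMeasure (twTake width 0 (c :: rest)).2.2 < twMeasure (c :: rest) := by
      conv_rhs => rw [← happ]
      rw [twMeasure_append]
      obtain ⟨a, as, ha⟩ : ∃ a as, (twTake width 0 (c :: rest)).1 = a :: as := by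
        cases hx : (twTake width 0 (c :: rest)).1 with
        | nil => exact absurd hx hp
        | cons a as => exact ⟨a, as, rfl⟩
      rw [ha]
      simp [twMeasure]
    split
    · next d rem' heq =>
      rw [heq] at hlt
      split
      · have := twHandleLong_le width (twTake width 0 (c :: rest)).2.1 d
        simp only [twMeasure, List.map_cons, List.sum_cons] at *
        omega
      · exact hlt
    · next heq =>
      simp [twMeasure]

theorem twStep_decreases (width : Nat) (hasLines : Bool) (c : List Char) (rest : List (List Char)) :
    twMeasure (twStep width hasLines (c :: rest)).2 < twMeasure (c :: rest) := by
  show twMeasure (twLine width (twDropLead hasLines (c :: rest))).2 < twMeasure (c :: rest)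
  have hred : twDropLead hasLines (c :: rest) =
      if (hasLines && (PySem.Chars.strip c == [])) = true then rest else c :: rest := by
    simp [twDropLead]
  rw [hred]
  by_cases hdel : (hasLines && (PySem.Chars.strip c == [])) = true
  · -- leading whitespace chunk dropped: remainder is (a line taken from) rest
    rw [if_pos hdel]
    have h1 := twLine_le width rest
    have h2 : twMeasure rest < twMeasure (c :: rest) := by simp [twMeasure]
    omega
  · rw [if_neg hdel]
    exact twLine_lt width (c :: rest) (by simp)

-- _wrap_chunks' outer loop (width = self.width - len(indent); both indents equal here)
def twWrapLoop (ind : List Char) (width : Nat) (acc : List (List Char)) (chunks : List (List Char)) :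
    List (List Char) :=
  match chunks with
  | [] => acc
  | c :: rest =>
    let r := twStep width (acc ≠ []) (c :: rest)
    twWrapLoop ind width
      (match r.1 with
       | some lineChunks => acc ++ [ind ++ PySem.Chars.join [] lineChunks]
       | none => acc)
      r.2
termination_by twMeasure chunks
decreasing_by exact twStep_decreases width _ c rest

-- textwrap.fill(text, width=80, initial_indent=ind, subsequent_indent=ind) on char lists.
-- The line width 80 - len(ind) uses Nat subtraction: exact under Pre_ (len(ind) ≤ 80).
def twFill (text ind : List Char) : List Char :=
  PySem.Chars.join ['\n'] (twWrapLoop ind (80 - ind.length) [] (twSplit (twMunge text) 0))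

-- textwrap.fill('\n'.join(lines), …) + '\n' — A's paragraph step
def twFillPar (ind : List Char) (lines : List (List Char)) : List Char :=
  twFill (PySem.Chars.join ['\n'] lines) ind ++ ['\n']

-- the body of A's for-loop, as a fold step over the state (filled, lines)
def stepA (ind : List Char) (st : List (List Char) × List (List Char)) (line : List Char) :
    List (List Char) × List (List Char) :=
  if PySem.Chars.split₀ line ≠ [] then (st.1, st.2 ++ [line])
  else if st.2 ≠ [] then (st.1 ++ [twFillPar ind st.2], [])
  else st

-- the post-loop flush ("if lines: filled.append(...)")
def finishA (ind : List Char) (st : List (List Char) × List (List Char)) : List (List Char) :=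
  if st.2 ≠ [] then st.1 ++ [twFillPar ind st.2] else st.1

def fill_with_paragraphs (string : String) (indent : String) : String :=
  String.mk (PySem.Chars.join ['\n']
    (finishA indent.toList
      ((PySem.Chars.splitOn string.toList ['\n']).foldl (stepA indent.toList) ([], []))))

-- ===== PORT B =====
-- B-side port of textwrap.fill, written over the character lists themselves:
-- _munge_whitespace as one fused pass, the wordsep_re tokenizer as a zipper
-- (reversed consumed prefix + remaining suffix), and _wrap_chunks as a single
-- fuel-bounded recursion that builds each line back-to-front.

-- expandtabs(8) and the whitespace→' ' translation in one pass
def bMunge (col : Nat) : List Char → List Char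
  | [] => []
  | c :: cs =>
    if c = '\t' then List.replicate (8 - col % 8) ' ' ++ bMunge (col + (8 - col % 8)) cs
    else if c = '\n' ∨ c = '\r' then ' ' :: bMunge 0 cs
    else (if twIsWS c then ' ' else c) :: bMunge (col + 1) cs

-- the hyphenated-word context pattern of wordsep_re: letter, then letter or '-' letter
-- (read off the head of a list: reversed prefix for the lookbehind, suffix for the lookahead)
def bHyPat : List Char → Bool
  | a :: b :: r =>
    twIsLetter a && (twIsLetter b || (b = '-' && (match r with | d :: _ => twIsLetter d | [] => false)))
  | _ => false

-- head-of-list test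
def bHeadIs (p : Char → Bool) : List Char → Bool
  | x :: _ => p x
  | [] => false

-- em-dash lookahead: at least two '-' followed by a word character
def bEmAhead (suf : List Char) : Bool :=
  2 ≤ (suf.takeWhile (· = '-')).length && bHeadIs twIsWord (suf.dropWhile (· = '-'))

-- scan to the end of the current word; ctx is the reversed consumed prefix,
-- acc the reversed word so far; returns (word, remaining suffix)
def bWordEnd (ctx acc suf : List Char) : List Char × List Char :=
  match suf with
  | [] => (acc.reverse, [])
  | c :: rest =>
    if c = '-' && bHyPat ctx && bHyPat rest then ((c :: acc).reverse, rest)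
    else if twIsWS c then (acc.reverse, c :: rest)
    else if bHeadIs twIsPunct ctx && bEmAhead (c :: rest) then (acc.reverse, c :: rest)
    else bWordEnd (c :: ctx) (c :: acc) rest

theorem bWordEnd_suf_le (ctx acc suf : List Char) :
    (bWordEnd ctx acc suf).2.length ≤ suf.length := by
  induction suf generalizing ctx acc with
  | nil => simp [bWordEnd]
  | cons c rest ih =>
    unfold bWordEnd
    split
    · simp
    · split
      · simp
      · split
        · simp
        · have := ih (c :: ctx) (c :: acc); simp; omega

-- the tokenizer: whitespace run | em-dash run | word, as a zipper over (pre, suf)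
def bTokens (pre suf : List Char) : List (List Char) :=
  match hs : suf with
  | [] => []
  | c :: rest =>
    if twIsWS c then
      suf.takeWhile twIsWS ::
        bTokens ((suf.takeWhile twIsWS).reverse ++ pre) (suf.dropWhile twIsWS)
    else if hem : bHeadIs twIsPunct pre && bEmAhead suf then
      suf.takeWhile (· = '-') ::
        bTokens ((suf.takeWhile (· = '-')).reverse ++ pre) (suf.dropWhile (· = '-'))
    else
      (bWordEnd (c :: pre) [c] rest).1 ::
        bTokens ((bWordEnd (c :: pre) [c] rest).1.reverse ++ pre) (bWordEnd (c :: pre) [c] rest).2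
termination_by suf.length
decreasing_by
  · rename_i hws
    rw [hs]; simp only [List.dropWhile_cons, hws, if_pos]
    have := List.length_dropWhile_le (fun x => twIsWS x) rest
    simp; omega
  · have h2 : 2 ≤ (suf.takeWhile (· = '-')).length := by
      simp [bEmAhead] at hem; exact hem.2.1
    have hc : c = '-' := by
      rw [hs] at h2
      by_contra hne
      simp [List.takeWhile_cons, hne] at h2
    rw [hs, List.dropWhile_cons]
    simp only [hc, if_pos]
    have := List.length_dropWhile_le (fun x => decide (x = '-')) rest
    simp at this ⊢
    omega
  · have := bWordEnd_suf_le (c :: pre) [c] rest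
    simp; omega

-- where to break an over-long word (break_long_words, break_on_hyphens)
def bBreakAt (width len : Nat) (c : List Char) : Nat :=
  let room := if width < 1 then 1 else width - len
  if c.length ≤ room then room
  else
    let hy := PySem.Chars.rfind (c.take room) ['-']
    if 0 < hy ∧ (c.take hy.toNat).any (fun x => x ≠ '-') then hy.toNat + 1 else room

-- greedy inner while: move chunks that still fit onto the current (reversed) line
def bFillLine (width len : Nat) (cur : List (List Char)) :
    List (List Char) → List (List Char) × Nat × List (List Char)
  | [] => (cur, len, [])
  | c :: rest =>
    if len + c.length ≤ width then bFillLine width (len + c.length) (c :: cur) rest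
    else (cur, len, c :: rest)

-- the outer while of _wrap_chunks, one recursion emitting lines front-to-back;
-- fuel bounds the iteration count (each iteration consumes at least one character or chunk)
def bWrap (ind : List Char) (width : Nat) : Nat → Bool → List (List Char) → List (List Char)
  | 0, _, _ => []
  | _ + 1, _, [] => []
  | fuel + 1, first, c :: rest =>
    let chunks1 := if !first && (PySem.Chars.strip c == []) then rest else c :: rest
    let r := bFillLine width 0 [] chunks1
    let r2 : List (List Char) × List (List Char) :=
      match r.2.2 with
      | d :: rem' =>
        if width < d.length then
          (d.take (bBreakAt width r.2.1 d) :: r.1, d.drop (bBreakAt width r.2.1 d) :: rem')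
        else (r.1, d :: rem')
      | [] => (r.1, [])
    let line : List (List Char) :=
      match r2.1 with
      | l :: ls => if PySem.Chars.strip l = [] then ls else l :: ls
      | [] => []
    match line with
    | [] => bWrap ind width fuel first r2.2
    | _ :: _ => (ind ++ PySem.Chars.join [] line.reverse) :: bWrap ind width fuel false r2.2

-- B's textwrap.fill: tokenize the munged text, then wrap with sufficient fuel
def bFill (text ind : List Char) : List Char :=
  PySem.Chars.join ['\n']
    (bWrap ind (80 - ind.length)
      (((bTokens [] (bMunge 0 text)).map List.length).sum + (bTokens [] (bMunge 0 text)).length)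
      true (bTokens [] (bMunge 0 text)))

-- bool(line.split()): the groupby key
def bKey (l : List Char) : Bool := !(PySem.Chars.split₀ l).isEmpty

-- itertools.groupby(lines, key=bKey), keeping only the key=True groups
def bParagraphs (lines : List (List Char)) : List (List (List Char)) :=
  match lines with
  | [] => []
  | l :: rest =>
    let grp := rest.takeWhile (fun x => bKey x == bKey l)
    let rest' := rest.dropWhile (fun x => bKey x == bKey l)
    if bKey l then (l :: grp) :: bParagraphs rest' else bParagraphs rest'
termination_by lines.length
decreasing_by
  all_goals
    have := List.length_dropWhile_le (fun x => bKey x == bKey l) rest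
    simp; omega

def fill_with_paragraphs_alt (string : String) (indent : String) : String :=
  String.mk (PySem.Chars.join ['\n']
    ((bParagraphs (PySem.Chars.splitOn string.toList ['\n'])).map
      (fun g => bFill (PySem.Chars.join ['\n'] g) indent.toList ++ ['\n'])))

-- ===== PRECONDITION & SPEC =====
-- Pre_ excludes indents longer than 80 characters: there the effective wrap width
-- 80 - len(indent) is nonpositive and textwrap's long-word handling makes no progress, so A
-- hangs forever whenever a paragraph starts with whitespace (e.g. (' a', 'x'*81)); on such
-- indents where A does return, B returns the same value.
def Pre_fill_with_paragraphs (string : String) (indent : String) : Prop :=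
  indent.toList.length ≤ 80
instance (string : String) (indent : String) : Decidable (Pre_fill_with_paragraphs string indent) := by
  unfold Pre_fill_with_paragraphs; infer_instance

def pvWitness_fill_with_paragraphs : String × String := ("hello world\n\n  second paragraph", "  ")

def Spec_fill_with_paragraphs (string : String) (indent : String) (out : String) : Prop := out = fill_with_paragraphs_alt string indent
instance (string : String) (indent : String) (out : String) : Decidable (Spec_fill_with_paragraphs string indent out) := by unfold Spec_fill_with_paragraphs; infer_instance

-- ===== CLAIM (what is proved, stated in full; the proofs are below) =====
def Claim_equal_fill_with_paragraphs : Prop := ∀ (string : String) (indent : String), Dom_fill_with_paragraphs string indent → Pre_fill_with_paragraphs string indent → Spec_fill_with_paragraphs string indent (fill_with_paragraphs string indent)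

-- ===== LEMMAS AND PROOFS =====
theorem bridge_munge (col : Nat) (cs : List Char) :
    bMunge col cs = (twExpandTabs col cs).map (fun c => if twIsWS c then ' ' else c) := by
  induction cs generalizing col with
  | nil => simp [bMunge, twExpandTabs]
  | cons c cs ih =>
    by_cases h1 : c = '\t'
    · simp [bMunge, twExpandTabs, h1, ih, twIsWS, List.map_replicate]
    · by_cases h2 : c = '\n' ∨ c = '\r'
      · rcases h2 with h | h <;> subst h <;>
          simp [bMunge, twExpandTabs, h1, ih, twIsWS]
      · simp [bMunge, twExpandTabs, h1, h2, ih]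

theorem drop_takeWhile_length {α : Type} (l : List α) (p : α → Bool) :
    l.drop (l.takeWhile p).length = l.dropWhile p := by
  calc l.drop (l.takeWhile p).length
      = (l.takeWhile p ++ l.dropWhile p).drop (l.takeWhile p).length := by
        rw [List.takeWhile_append_dropWhile]
    _ = l.dropWhile p := List.drop_left
theorem take_takeWhile_length {α : Type} (l : List α) (p : α → Bool) :
    l.take (l.takeWhile p).length = l.takeWhile p := by
  calc l.take (l.takeWhile p).length
      = (l.takeWhile p ++ l.dropWhile p).take (l.takeWhile p).length := by
        rw [List.takeWhile_append_dropWhile]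
    _ = l.takeWhile p := List.take_left

-- position translation: indices at or after the zipper point read the suffix …
theorem twTest_front (pre suf : List Char) (m : Nat) (p : Char → Bool) :
    twTest (pre.reverse ++ suf) (pre.length + m) p =
      (match suf[m]? with | some c => p c | none => false) := by
  unfold twTest
  rw [List.getElem?_append_right (by simp)]
  simp

-- … and indices before it read the reversed prefix
theorem twTest_back (pre suf : List Char) (k : Nat) (p : Char → Bool) (hk : k < pre.length) :
    twTest (pre.reverse ++ suf) (pre.length - 1 - k) p =
      (match pre[k]? with | some c => p c | none => false) := by
  unfold twTest
  rw [List.getElem?_append_left (by rw [List.length_reverse]; omega)]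
  rw [List.getElem?_reverse (by omega)]
  congr 2
  omega

-- the character at the zipper point
theorem head_at (pre : List Char) (c : Char) (rest : List Char)
    (h : pre.length < (pre.reverse ++ c :: rest).length) :
    (pre.reverse ++ c :: rest)[pre.length] = c := by
  have h2 : (pre.reverse ++ c :: rest)[pre.length]? = some c := by
    rw [List.getElem?_append_right (by simp)]; simp
  rw [List.getElem?_eq_getElem h] at h2
  exact Option.some.inj h2

-- wordsep_re's hyphen lookbehind, read off the reversed prefix
theorem behind_iff (pre suf : List Char) :
    ((2 ≤ pre.length ∧ twTest (pre.reverse ++ suf) (pre.length-2) twIsLetter = true ∧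
        twTest (pre.reverse ++ suf) (pre.length-1) twIsLetter = true) ∨
     (3 ≤ pre.length ∧ twTest (pre.reverse ++ suf) (pre.length-3) twIsLetter = true ∧
        twTest (pre.reverse ++ suf) (pre.length-2) (· = '-') = true ∧
        twTest (pre.reverse ++ suf) (pre.length-1) twIsLetter = true))
    ↔ bHyPat pre = true := by
  match pre with
  | [] => simp [bHyPat]
  | [a] => simp [bHyPat]
  | [a, b] =>
    simp [twTest, bHyPat]
    tauto
  | a :: b :: d :: r =>
    have t0 : twTest ((a :: b :: d :: r).reverse ++ suf) ((a :: b :: d :: r).length - 1) twIsLetter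
        = (match (a :: b :: d :: r)[0]? with | some c => twIsLetter c | none => false) := by
      simpa using twTest_back (a :: b :: d :: r) suf 0 twIsLetter (by simp)
    have t1l := twTest_back (a :: b :: d :: r) suf 1 twIsLetter (by simp)
    have t1d := twTest_back (a :: b :: d :: r) suf 1 (· = '-') (by simp)
    have t2 := twTest_back (a :: b :: d :: r) suf 2 twIsLetter (by simp)
    have e2 : (a :: b :: d :: r).length - 2 = (a :: b :: d :: r).length - 1 - 1 := rfl
    have e3 : (a :: b :: d :: r).length - 3 = (a :: b :: d :: r).length - 1 - 2 := rfl
    rw [e2, e3, t2, t1l, t1d, t0]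
    simp [bHyPat]
    tauto

-- wordsep_re's hyphen lookahead, read off the remaining suffix
theorem ahead_iff (pre : List Char) (c : Char) (rest : List Char) :
    (twTest (pre.reverse ++ c :: rest) (pre.length+1) twIsLetter = true ∧
      (twTest (pre.reverse ++ c :: rest) (pre.length+2) twIsLetter = true ∨
       (twTest (pre.reverse ++ c :: rest) (pre.length+2) (· = '-') = true ∧
        twTest (pre.reverse ++ c :: rest) (pre.length+3) twIsLetter = true)))
    ↔ bHyPat rest = true := by
  have t1 := twTest_front pre (c :: rest) 1
  have t2 := twTest_front pre (c :: rest) 2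
  have t3 := twTest_front pre (c :: rest) 3
  rw [t1, t2, t2, t3]
  match rest with
  | [] => simp [bHyPat]
  | [a] => simp [bHyPat]
  | [a, b] => simp [bHyPat]
  | a :: b :: d :: r => simp [bHyPat]

-- the '-' run ahead of the zipper point
theorem run_drop (pre suf : List Char) :
    twHyphenRun (pre.reverse ++ suf) pre.length = (suf.takeWhile (· = '-')).length := by
  unfold twHyphenRun
  rw [show pre.length = pre.reverse.length by simp, List.drop_left]

-- the character after that run
theorem word_after (pre suf : List Char) :
    twTest (pre.reverse ++ suf) (pre.length + (suf.takeWhile (· = '-')).length) twIsWord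
      = bHeadIs twIsWord (suf.dropWhile (· = '-')) := by
  rw [twTest_front]
  have h : suf[(suf.takeWhile (· = '-')).length]? = (suf.dropWhile (· = '-'))[0]? := by
    rw [← drop_takeWhile_length suf (· = '-'), List.getElem?_drop]
    simp
  rw [h]
  cases suf.dropWhile (· = '-') <;> simp [bHeadIs]

theorem twWordScan_le (cs : List Char) (j : Nat) : twWordScan cs j ≤ max j cs.length := by
  fun_induction twWordScan cs j <;> omega

-- the em-dash lookbehind, read off the reversed prefix
theorem punct_back (pre suf : List Char) (hp : pre ≠ []) :
    twTest (pre.reverse ++ suf) (pre.length - 1) twIsPunct = bHeadIs twIsPunct pre := by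
  cases pre with
  | nil => exact absurd rfl hp
  | cons p pr =>
    have t := twTest_back (p :: pr) suf 0 twIsPunct (by simp)
    simpa [bHeadIs] using t

theorem bWordEnd_eq (suf : List Char) : ∀ (pre acc : List Char), pre ≠ [] →
    bWordEnd pre acc suf =
      (acc.reverse ++ suf.take (twWordScan (pre.reverse ++ suf) pre.length - pre.length),
       suf.drop (twWordScan (pre.reverse ++ suf) pre.length - pre.length)) := by
  induction suf with
  | nil =>
    intro pre acc hp
    rw [bWordEnd, twWordScan]
    simp
  | cons c rest ih =>
    intro pre acc hp
    have hj : pre.length < (pre.reverse ++ c :: rest).length := by simp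
    have hcj : (pre.reverse ++ c :: rest)[pre.length] = c := head_at pre c rest hj
    rw [twWordScan, dif_pos hj, hcj]
    rw [bWordEnd]
    -- hyphenated-word stop
    have h1iff : (c = '-' ∧
        ((2 ≤ pre.length ∧ twTest (pre.reverse ++ c :: rest) (pre.length-2) twIsLetter = true ∧
            twTest (pre.reverse ++ c :: rest) (pre.length-1) twIsLetter = true) ∨
         (3 ≤ pre.length ∧ twTest (pre.reverse ++ c :: rest) (pre.length-3) twIsLetter = true ∧
            twTest (pre.reverse ++ c :: rest) (pre.length-2) (· = '-') = true ∧
            twTest (pre.reverse ++ c :: rest) (pre.length-1) twIsLetter = true)) ∧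
        (twTest (pre.reverse ++ c :: rest) (pre.length+1) twIsLetter = true ∧
          (twTest (pre.reverse ++ c :: rest) (pre.length+2) twIsLetter = true ∨
           (twTest (pre.reverse ++ c :: rest) (pre.length+2) (· = '-') = true ∧
            twTest (pre.reverse ++ c :: rest) (pre.length+3) twIsLetter = true))))
        ↔ (c = '-' && bHyPat pre && bHyPat rest) = true := by
      rw [behind_iff pre (c :: rest), ahead_iff pre c rest]
      simp
      tauto
    -- em-dash-ahead stop
    have h3iff : (twTest (pre.reverse ++ c :: rest) (pre.length - 1) twIsPunct = true ∧
        2 ≤ twHyphenRun (pre.reverse ++ c :: rest) pre.length ∧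
        twTest (pre.reverse ++ c :: rest)
          (pre.length + twHyphenRun (pre.reverse ++ c :: rest) pre.length) twIsWord = true)
        ↔ (bHeadIs twIsPunct pre && bEmAhead (c :: rest)) = true := by
      rw [punct_back pre (c :: rest) hp, run_drop pre (c :: rest), word_after pre (c :: rest)]
      simp [bEmAhead]
    by_cases hb1 : (c = '-' && bHyPat pre && bHyPat rest) = true
    · rw [if_pos (h1iff.mpr hb1), if_pos hb1]
      have e1 : pre.length + 1 - pre.length = 1 := by omega
      simp [e1]
    · rw [if_neg (fun hC => hb1 (h1iff.mp hC)), if_neg hb1]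
      by_cases hws : twIsWS c = true
      · rw [if_pos hws, if_pos hws]
        simp
      · rw [if_neg hws, if_neg hws]
        by_cases hem : (bHeadIs twIsPunct pre && bEmAhead (c :: rest)) = true
        · rw [if_pos (h3iff.mpr hem), if_pos hem]
          simp
        · rw [if_neg (fun hC => hem (h3iff.mp hC)), if_neg hem]
          have hcs : (c :: pre).reverse ++ rest = pre.reverse ++ c :: rest := by simp
          have hih := ih (c :: pre) (c :: acc) (by simp)
          rw [hcs] at hih
          rw [hih]
          have hge := twWordScan_ge (pre.reverse ++ c :: rest) (pre.length + 1)
          have e1 : (c :: pre).length = pre.length + 1 := by simp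
          rw [e1]
          set w := twWordScan (pre.reverse ++ c :: rest) (pre.length + 1) with hw
          have e2 : w - pre.length = (w - (pre.length + 1)) + 1 := by omega
          rw [e2, List.take_succ_cons, List.drop_succ_cons]
          simp

theorem bridge_tokens (pre suf : List Char) :
    bTokens pre suf = twSplit (pre.reverse ++ suf) pre.length := by
  fun_induction bTokens pre suf with
  | case1 pre => rw [twSplit]; simp
  | case2 pre c rest hws ih =>
    have hj : pre.length < (pre.reverse ++ c :: rest).length := by simp
    have hcj : (pre.reverse ++ c :: rest)[pre.length] = c := head_at pre c rest hj
    have hdi : (pre.reverse ++ c :: rest).drop pre.length = c :: rest := by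
      rw [show pre.length = pre.reverse.length from by simp, List.drop_left]
    rw [twSplit, dif_pos hj, hcj, if_pos hws]
    simp only [hdi]
    rw [take_takeWhile_length]
    congr 1
    rw [ih]
    congr 1
    · simp [List.takeWhile_append_dropWhile]
    · simp [Nat.add_comm]
  | case3 pre c rest hws hem ih =>
    have hj : pre.length < (pre.reverse ++ c :: rest).length := by simp
    have hcj : (pre.reverse ++ c :: rest)[pre.length] = c := head_at pre c rest hj
    have hdi : (pre.reverse ++ c :: rest).drop pre.length = c :: rest := by
      rw [show pre.length = pre.reverse.length from by simp, List.drop_left]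
    rw [dif_pos hem]
    have hem' := hem
    simp only [Bool.and_eq_true, bEmAhead, decide_eq_true_eq] at hem'
    have hp : pre ≠ [] := by
      cases pre
      · simp [bHeadIs] at hem'
      · simp
    have hrun : 2 ≤ ((c :: rest).takeWhile (· = '-')).length := hem'.2.1
    have hc : c = '-' := by
      by_contra hne
      simp [List.takeWhile_cons, hne] at hrun
    have hC2 : c = '-' ∧ 1 ≤ pre.length ∧
        twTest (pre.reverse ++ c :: rest) (pre.length - 1) twIsPunct = true ∧
        2 ≤ twHyphenRun (pre.reverse ++ c :: rest) pre.length ∧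
        twTest (pre.reverse ++ c :: rest)
          (pre.length + twHyphenRun (pre.reverse ++ c :: rest) pre.length) twIsWord = true := by
      refine ⟨hc, ?_, ?_, ?_, ?_⟩
      · cases pre
        · exact absurd rfl hp
        · simp
      · rw [punct_back pre (c :: rest) hp]; exact hem'.1
      · rw [run_drop pre (c :: rest)]; exact hrun
      · rw [run_drop pre (c :: rest), word_after pre (c :: rest)]; exact hem'.2.2
    rw [twSplit, dif_pos hj, hcj, if_neg hws, if_pos hC2]
    simp only [hdi, run_drop pre (c :: rest)]
    rw [take_takeWhile_length]
    congr 1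
    rw [ih]
    congr 1
    · simp [List.takeWhile_append_dropWhile]
    · simp [Nat.add_comm]
  | case4 pre c rest hws hem ih =>
    have hj : pre.length < (pre.reverse ++ c :: rest).length := by simp
    have hcj : (pre.reverse ++ c :: rest)[pre.length] = c := head_at pre c rest hj
    have hdi : (pre.reverse ++ c :: rest).drop pre.length = c :: rest := by
      rw [show pre.length = pre.reverse.length from by simp, List.drop_left]
    rw [dif_neg hem]
    have hnC2 : ¬ (c = '-' ∧ 1 ≤ pre.length ∧
        twTest (pre.reverse ++ c :: rest) (pre.length - 1) twIsPunct = true ∧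
        2 ≤ twHyphenRun (pre.reverse ++ c :: rest) pre.length ∧
        twTest (pre.reverse ++ c :: rest)
          (pre.length + twHyphenRun (pre.reverse ++ c :: rest) pre.length) twIsWord = true) := by
      rintro ⟨hc, h1, hpunct, hrun, hword⟩
      have hp : pre ≠ [] := by cases pre <;> simp_all
      apply hem
      simp only [Bool.and_eq_true, bEmAhead, decide_eq_true_eq]
      refine ⟨by rw [← punct_back pre (c :: rest) hp]; exact hpunct, ?_, ?_⟩
      · rw [← run_drop pre (c :: rest)]; exact hrun
      · rw [← word_after pre (c :: rest), ← run_drop pre (c :: rest)]; exact hword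
    rw [twSplit, dif_pos hj, hcj, if_neg hws, if_neg hnC2]
    have hcs : (c :: pre).reverse ++ rest = pre.reverse ++ c :: rest := by simp
    have hwe := bWordEnd_eq rest (c :: pre) [c] (by simp)
    rw [hcs] at hwe
    have hel : (c :: pre).length = pre.length + 1 := by simp
    rw [hel] at hwe
    have hge := twWordScan_ge (pre.reverse ++ c :: rest) (pre.length + 1)
    have hle := twWordScan_le (pre.reverse ++ c :: rest) (pre.length + 1)
    simp only [List.length_append, List.length_reverse, List.length_cons] at hle
    set W := twWordScan (pre.reverse ++ c :: rest) (pre.length + 1) with hW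
    have hWle : W ≤ pre.length + 1 + rest.length := by omega
    simp only [hdi]
    have e2 : W - pre.length = (W - (pre.length + 1)) + 1 := by omega
    rw [e2, List.take_succ_cons]
    rw [hwe]
    simp only [List.reverse_cons, List.reverse_nil, List.nil_append]
    congr 1
    rw [hwe] at ih
    simp only [List.reverse_cons, List.reverse_nil, List.nil_append] at ih
    rw [ih]
    congr 1
    · simp only [List.reverse_append, List.reverse_reverse, List.reverse_cons,
        List.reverse_nil, List.nil_append, List.append_assoc]
      simp [List.take_append_drop]
    · have hmin : min (W - (pre.length + 1)) rest.length = W - (pre.length + 1) := by omega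
      simp only [List.length_append, List.length_reverse, List.length_cons, List.length_take,
        List.length_nil, hmin]
      omega

theorem bFillLine_eq (width : Nat) (chunks : List (List Char)) :
    ∀ (len : Nat) (cur : List (List Char)),
    bFillLine width len cur chunks =
      ((twTake width len chunks).1.reverse ++ cur,
       (twTake width len chunks).2.1, (twTake width len chunks).2.2) := by
  induction chunks with
  | nil => intro len cur; simp [bFillLine, twTake]
  | cons c rest ih =>
    intro len cur
    by_cases h : len + c.length ≤ width
    · simp [bFillLine, twTake, h, ih]
    · simp [bFillLine, twTake, h]

theorem bBreak_eq (width clen : Nat) (c : List Char) :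
    twHandleLong width clen c = (c.take (bBreakAt width clen c), c.drop (bBreakAt width clen c)) := by
  unfold twHandleLong bBreakAt
  by_cases h : (if width < 1 then 1 else width - clen) < c.length
  · simp only [if_pos h, if_neg (by omega : ¬ c.length ≤ (if width < 1 then 1 else width - clen))]
  · simp only [if_neg h, if_pos (by omega : c.length ≤ (if width < 1 then 1 else width - clen))]

theorem dropTrail_rev (L0 : List (List Char)) :
    (twDropTrailWS L0).reverse =
      (match L0.reverse with
       | l :: ls => if PySem.Chars.strip l = [] then ls else l :: ls
       | [] => ([] : List (List Char))) := by
  cases hrev : L0.reverse with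
  | nil =>
    have h0 : L0 = [] := by simpa using congrArg List.reverse hrev
    subst h0; simp [twDropTrailWS]
  | cons l ls =>
    have hL : L0 = ls.reverse ++ [l] := by
      have := congrArg List.reverse hrev; simpa using this
    by_cases hstrip : PySem.Chars.strip l = [] <;>
      simp [twDropTrailWS, hL, hstrip]

theorem bDropLead_eq (hl : Bool) (c : List Char) (rest : List (List Char)) :
    twDropLead hl (c :: rest) = (if hl && (PySem.Chars.strip c == []) then rest else c :: rest) := by
  simp [twDropLead]

theorem bWrap_step (ind : List Char) (width fuel : Nat) (first : Bool) (c : List Char)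
    (rest : List (List Char)) :
    bWrap ind width (fuel+1) first (c :: rest) =
      (match (twStep width (!first) (c :: rest)).1 with
       | some lineChunks => [ind ++ PySem.Chars.join [] lineChunks]
       | none => []) ++
      bWrap ind width fuel (first && (twStep width (!first) (c :: rest)).1.isNone)
        (twStep width (!first) (c :: rest)).2 := by
  rw [bWrap]
  rw [show (if !first && (PySem.Chars.strip c == []) then rest else c :: rest)
        = twDropLead (!first) (c :: rest) from (bDropLead_eq (!first) c rest).symm]
  set CH := twDropLead (!first) (c :: rest) with hCH
  rw [bFillLine_eq]
  simp only [List.append_nil]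
  set T := twTake width 0 CH with hT
  -- the long-word fix-up equals twLine, with the line reversed
  have hr2 :
      (match T.2.2 with
       | d :: rem' =>
         if width < d.length then
           (d.take (bBreakAt width T.2.1 d) :: T.1.reverse, d.drop (bBreakAt width T.2.1 d) :: rem')
         else (T.1.reverse, d :: rem')
       | [] => (T.1.reverse, ([] : List (List Char))))
      = ((twLine width CH).1.reverse, (twLine width CH).2) := by
    rw [twLine, ← hT]
    cases hdd : T.2.2 with
    | nil => simp
    | cons d rem' =>
      by_cases hw : width < d.length
      · simp [hw, bBreak_eq]
      · simp [hw]
  rw [hr2]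
  set L0 := (twLine width CH).1 with hL0
  have hline :
      (match L0.reverse with
       | l :: ls => if PySem.Chars.strip l = [] then ls else l :: ls
       | [] => ([] : List (List Char)))
      = (twDropTrailWS L0).reverse := (dropTrail_rev L0).symm
  rw [hline]
  rw [twStep, ← hCH, ← hL0]
  cases hdt : twDropTrailWS L0 with
  | nil => simp
  | cons x xs =>
    cases h2 : xs.reverse ++ [x] with
    | nil => exact absurd h2 (by simp)
    | cons y ys =>
      simp only [List.reverse_cons, h2]
      have h3 : ys.reverse ++ [y] = x :: xs := by
        have h4 := congrArg List.reverse h2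
        simpa using h4.symm
      simp [h3]

theorem bridge_wrap (ind : List Char) (width : Nat) (fuel : Nat) :
    ∀ (acc chunks : List (List Char)), twMeasure chunks ≤ fuel →
    twWrapLoop ind width acc chunks = acc ++ bWrap ind width fuel acc.isEmpty chunks := by
  induction fuel with
  | zero =>
    intro acc chunks hf
    have h0 : chunks = [] := by
      cases chunks with
      | nil => rfl
      | cons c rest => simp [twMeasure] at hf
    subst h0
    simp [twWrapLoop, bWrap]
  | succ fuel ih =>
    intro acc chunks hf
    cases chunks with
    | nil => simp [twWrapLoop, bWrap]
    | cons c rest =>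
      rw [twWrapLoop, bWrap_step]
      have hb : (!acc.isEmpty) = decide (acc ≠ []) := by cases acc <;> simp
      rw [hb]
      have hm : twMeasure (twStep width (decide (acc ≠ [])) (c :: rest)).2 ≤ fuel := by
        have := twStep_decreases width (decide (acc ≠ [])) c rest
        omega
      simp only [ne_eq, decide_not] at hm ⊢
      cases hr1 : (twStep width (!decide (acc = [])) (c :: rest)).1 with
      | none =>
        rw [ih acc _ hm]
        simp [hr1]
      | some lc =>
        rw [ih (acc ++ [ind ++ PySem.Chars.join [] lc]) _ hm]
        simp only [hr1, List.append_assoc, List.singleton_append]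
        have he : (acc ++ [ind ++ PySem.Chars.join [] lc]).isEmpty = false := by simp
        rw [he]
        simp

theorem bFuel_eq (ts : List (List Char)) :
    (ts.map List.length).sum + ts.length = twMeasure ts := by
  induction ts with
  | nil => simp [twMeasure]
  | cons c rest ih => simp [twMeasure, List.map_cons] at *; omega

theorem bridge_fill (text ind : List Char) : bFill text ind = twFill text ind := by
  unfold bFill twFill
  have hm : bMunge 0 text = twMunge text := by rw [twMunge]; exact bridge_munge 0 text
  rw [hm]
  have ht : bTokens [] (twMunge text) = twSplit (twMunge text) 0 := by
    simpa using bridge_tokens [] (twMunge text)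
  rw [ht]
  rw [bFuel_eq]
  rw [bridge_wrap ind (80 - ind.length) (twMeasure (twSplit (twMunge text) 0)) []
        (twSplit (twMunge text) 0) (le_refl _)]
  simp

-- the list of maximal non-blank runs, in takeWhile/dropWhile form (proof-only reference shape)
def runsSpec (lines : List (List Char)) : List (List (List Char)) :=
  match lines with
  | [] => []
  | l :: rest =>
    if PySem.Chars.split₀ l = [] then runsSpec rest
    else (l :: rest.takeWhile (fun x => PySem.Chars.split₀ x ≠ [])) ::
         runsSpec (rest.dropWhile (fun x => PySem.Chars.split₀ x ≠ []))
termination_by lines.length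
decreasing_by
  · simp
  · simp only [List.length_cons]
    have := List.length_dropWhile_le (fun x : List Char => decide (PySem.Chars.split₀ x ≠ [])) rest
    omega

theorem key_iff (x : List Char) : (bKey x = true) ↔ PySem.Chars.split₀ x ≠ [] := by
  simp [bKey]

theorem runsSpec_dropBlank (l : List Char) (rest : List (List Char))
    (hl : PySem.Chars.split₀ l = []) :
    runsSpec (rest.dropWhile (fun x => bKey x == false)) = runsSpec (l :: rest) := by
  rw [show runsSpec (l :: rest) = runsSpec rest by rw [runsSpec]; simp [hl]]
  induction rest with
  | nil => simp
  | cons r rs ih =>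
    by_cases hr : bKey r = true
    · simp [List.dropWhile_cons, hr]
    · simp only [Bool.not_eq_true] at hr
      rw [List.dropWhile_cons]
      simp only [hr]
      rw [show runsSpec (r :: rs) = runsSpec rs by
        rw [runsSpec]
        have : PySem.Chars.split₀ r = [] := by
          by_contra hc; exact absurd ((key_iff r).mpr hc) (by simp [hr])
        simp [this]]
      simpa using ih

theorem bParagraphs_eq_runsSpec (lines : List (List Char)) :
    bParagraphs lines = runsSpec lines := by
  fun_induction bParagraphs lines with
  | case1 => rw [runsSpec]
  | case2 l rest grp rest' hk ih =>
    have hpred : (fun x => bKey x == bKey l) = (fun x : List Char => decide (PySem.Chars.split₀ x ≠ [])) := by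
      funext x
      rw [hk]
      by_cases hx : PySem.Chars.split₀ x = [] <;> simp [bKey, hx]
    have hl : PySem.Chars.split₀ l ≠ [] := (key_iff l).mp hk
    rw [show runsSpec (l :: rest)
          = (l :: rest.takeWhile (fun x => PySem.Chars.split₀ x ≠ [])) ::
            runsSpec (rest.dropWhile (fun x => PySem.Chars.split₀ x ≠ [])) by
        rw [runsSpec]; simp [hl]]
    rw [ih]
    simp only [grp, rest', hpred]
  | case3 l rest rst hneg ih =>
    have hk : bKey l = false := by
      cases hb : bKey l
      · rfl
      · exact absurd hb hneg
    have hpred : (fun x => bKey x == bKey l) = (fun x : List Char => bKey x == false) := by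
      funext x; rw [hk]
    have hl : PySem.Chars.split₀ l = [] := by
      by_contra hc; exact absurd ((key_iff l).mpr hc) (by simp [hk])
    rw [ih]
    simp only [rst, hpred]
    rw [runsSpec_dropBlank l rest hl]


-- A's fold, with the final flush, produces exactly the runs (fillPar applied to each)
theorem foldA_runs (ind : List Char) (L : List (List Char)) :
    ∀ (filled : List (List Char)) (cur : List (List Char)),
    finishA ind (L.foldl (stepA ind) (filled, cur)) =
    filled ++ (if cur = [] then runsSpec L
               else (cur ++ L.takeWhile (fun x => PySem.Chars.split₀ x ≠ [])) ::
                    runsSpec (L.dropWhile (fun x => PySem.Chars.split₀ x ≠ []))).map (twFillPar ind) := by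
  induction L with
  | nil =>
    intro filled cur
    by_cases hc : cur = [] <;> simp [finishA, runsSpec, hc]
  | cons l rest ih =>
    intro filled cur
    rw [List.foldl_cons]
    by_cases hl : PySem.Chars.split₀ l = []
    · -- blank line: flush the pending paragraph (if any)
      by_cases hc : cur = []
      · subst hc
        rw [show stepA ind (filled, []) l = (filled, []) by simp [stepA, hl]]
        rw [ih filled []]
        simp [runsSpec, hl]
      · rw [show stepA ind (filled, cur) l = (filled ++ [twFillPar ind cur], []) by
          simp [stepA, hl, hc]]
        rw [ih (filled ++ [twFillPar ind cur]) []]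
        simp only [if_neg hc]
        rw [List.takeWhile_cons, List.dropWhile_cons]
        simp [hl, runsSpec, List.append_assoc]
    · -- non-blank line: extend the pending paragraph
      rw [show stepA ind (filled, cur) l = (filled, cur ++ [l]) by simp [stepA, hl]]
      rw [ih filled (cur ++ [l])]
      have hne : cur ++ [l] ≠ [] := by simp
      rw [if_neg hne]
      by_cases hc : cur = []
      · subst hc
        simp only [List.nil_append, reduceIte]
        rw [show runsSpec (l :: rest) =
            (l :: rest.takeWhile (fun x => PySem.Chars.split₀ x ≠ [])) ::
            runsSpec (rest.dropWhile (fun x => PySem.Chars.split₀ x ≠ [])) by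
          rw [runsSpec]; simp [hl]]
        simp
      · rw [if_neg hc]
        rw [List.takeWhile_cons, List.dropWhile_cons]
        simp [hl, List.append_assoc]

-- ===== VERDICT (by name: the statement is the Claim_ definition above) =====
theorem fill_with_paragraphs_spec : Claim_equal_fill_with_paragraphs := by
  intro s ind _ _
  unfold Spec_fill_with_paragraphs fill_with_paragraphs fill_with_paragraphs_alt
  rw [bParagraphs_eq_runsSpec]
  have h := foldA_runs ind.toList (PySem.Chars.splitOn s.toList ['\n']) [] []
  simp only [List.nil_append, if_true] at h
  rw [h]
  congr 2
  apply List.map_congr_left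
  intro g _
  rw [bridge_fill]
  rfl
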